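-- pv_equiv track=rewrite | github.com/varunamespace/python | Arrays/andxoror.py | andXorOr
-- ===== SOURCE A (Python) =====
-- def andXorOr(a):
--     stack = []
--     def findminandmax(a, length):
--         min1 = min(a[0], a[1])
--         min2 = max(a[0], a[1])
--         for i in range(2, length + 1):
--             if a[i] < min1:
--                 if a[i] < min2:
--                     min2 = min1
--                     min1 = a[i]
--             elif a[i] > min1:
--                 if a[i] < min2:
--                     min2 = a[i]
--         eq = (((min2 & min1) ^ (min2 | min1)) & (min2 ^ min1))
--         return eq,min1,min2
--     for i in range(1,len(a)):
--         res = findminandmax(a,i)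
--         if len(stack) == 0:
--             stack.append(res)
--         elif len(stack)!=0:
--             var = stack.pop()
--             if res > var:
--                 stack.append(res)
--             else:
--                 stack.append(var)
--     return stack[0]
-- ===== SOURCE B (Python) =====
-- def andXorOr(a):
--     m1, m2 = min(a[0], a[1]), max(a[0], a[1])
--     best = (m1 ^ m2, m1, m2)
--     for x in a[2:]:
--         if x < m1:
--             m1, m2 = x, m1
--         elif m1 < x < m2:
--             m2 = x
--         cand = (m1 ^ m2, m1, m2)
--         if cand > best:
--             best = cand
--     return best
-- ===== Notes on version B (the rewrite author's own statement) =====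
-- stated objective: faster
-- what changed: A recomputes the two tracked minima from scratch over every prefix (a full rescan per outer iteration); B makes one left-to-right pass, updating the two minima incrementally per element and keeping a running lexicographic maximum of the (min1^min2, min1, min2) triple.
import Mathlib
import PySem

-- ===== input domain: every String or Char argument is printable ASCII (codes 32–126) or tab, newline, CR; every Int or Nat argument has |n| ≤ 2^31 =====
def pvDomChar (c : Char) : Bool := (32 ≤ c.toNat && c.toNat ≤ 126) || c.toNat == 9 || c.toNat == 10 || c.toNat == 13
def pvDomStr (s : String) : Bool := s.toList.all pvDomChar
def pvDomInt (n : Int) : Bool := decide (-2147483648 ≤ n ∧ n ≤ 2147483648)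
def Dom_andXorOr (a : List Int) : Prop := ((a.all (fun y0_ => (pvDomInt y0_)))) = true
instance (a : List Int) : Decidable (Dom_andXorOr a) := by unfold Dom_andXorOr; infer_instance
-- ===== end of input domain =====

-- B replaces A's quadratic rescan of every prefix (findminandmax from scratch for each i) by a single
-- left-to-right pass that maintains the two tracked minima incrementally and keeps a running maximum
-- triple; objective: faster (one pass instead of a rescan per prefix). Return value only; no mutation.

-- ===== PORT A =====
-- Python tuple comparison 'res > var' (lexicographic), helper shared by both ports.
def pvLexGt : List Int → List Int → Bool
  | _ :: _, [] => true
  | x :: xs, y :: ys => if y < x then true else if x < y then false else pvLexGt xs ys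
  | [], _ => false

-- body of A's inner 'for i in range(2, length+1)' loop, on the fetched value
def pvAStepVal (p : Int × Int) (x : Int) : Int × Int :=
  if x < p.1 then (if x < p.2 then (x, p.1) else p)
  else if p.1 < x then (if x < p.2 then (p.1, x) else p)
  else p

def pvFindMinAndMax (a : List Int) (length : Int) : List Int :=
  let min1 := min (PySem.List.pyGetD a 0 0) (PySem.List.pyGetD a 1 0)
  let min2 := max (PySem.List.pyGetD a 0 0) (PySem.List.pyGetD a 1 0)
  let p := (PySem.List.pyRange 2 (length + 1) 1).foldl
    (fun p i => pvAStepVal p (PySem.List.pyGetD a i 0)) (min1, min2)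
  [PySem.Int.band (PySem.Int.bxor (PySem.Int.band p.2 p.1) (PySem.Int.bor p.2 p.1))
      (PySem.Int.bxor p.2 p.1), p.1, p.2]

-- body of A's outer 'for i in range(1, len(a))' loop (stack discipline kept literally)
def pvOuterStep (a : List Int) (stack : List (List Int)) (i : Int) : List (List Int) :=
  let res := pvFindMinAndMax a i
  if stack.length = 0 then stack ++ [res]
  else
    let var := stack.getLast?.getD []      -- stack.pop()
    let stack' := stack.dropLast
    if pvLexGt res var then stack' ++ [res] else stack' ++ [var]

def andXorOr (a : List Int) : List Int :=
  let stack := (PySem.List.pyRange 1 ((a.length : Int)) 1).foldl (pvOuterStep a) []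
  PySem.List.pyGetD stack 0 []

-- ===== PORT B =====
-- B's incremental update of the two tracked minima (one step per new element)
def pvBStep (p : Int × Int) (x : Int) : Int × Int :=
  if x < p.1 then (x, p.1)
  else if p.1 < x ∧ x < p.2 then (p.1, x)
  else p

def andXorOr_alt (a : List Int) : List Int :=
  match a with
  | a0 :: a1 :: rest =>
    let m1 := min a0 a1
    let m2 := max a0 a1
    let s := rest.foldl
      (fun (s : (Int × Int) × List Int) x =>
        let p := pvBStep s.1 x
        let cand := [PySem.Int.bxor p.1 p.2, p.1, p.2]
        (p, if pvLexGt cand s.2 then cand else s.2))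
      ((m1, m2), [PySem.Int.bxor m1 m2, m1, m2])
    s.2
  | _ => []  -- unreachable under Pre_ (A raises IndexError on lists shorter than 2)

-- ===== PRECONDITION & SPEC =====
-- Pre_ excludes exactly the inputs where A raises: len(a) < 2 (a[1] IndexError, or stack[0] on the
-- empty stack); A returns normally on every list of length ≥ 2.
def Pre_andXorOr (a : List Int) : Prop := 2 ≤ a.length
instance (a : List Int) : Decidable (Pre_andXorOr a) := by unfold Pre_andXorOr; infer_instance
def pvWitness_andXorOr : List Int := [3, 7, 2]

def Spec_andXorOr (a : List Int) (out : List Int) : Prop := out = andXorOr_alt a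
instance (a : List Int) (out : List Int) : Decidable (Spec_andXorOr a out) := by unfold Spec_andXorOr; infer_instance

-- ===== CLAIM (what is proved, stated in full; the proofs are below) =====
def Claim_equal_andXorOr : Prop := ∀ (a : List Int), Dom_andXorOr a → Pre_andXorOr a → Spec_andXorOr a (andXorOr a)

-- ===== LEMMAS AND PROOFS =====

-- triple both programs effectively build from the two minima
def pvMkB (p : Int × Int) : List Int := [PySem.Int.bxor p.1 p.2, p.1, p.2]

-- (m & n) + ldiff m n = m  on Nat
theorem pv_and_add_ldiff (m n : Nat) : (m &&& n) + Nat.ldiff m n = m := by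
  induction m using Nat.binaryRec generalizing n with
  | zero =>
    have h0 : Nat.ldiff 0 n = 0 := Nat.eq_of_testBit_eq fun i => by
      simp [Nat.testBit_ldiff]
    simp [h0]
  | bit b m ih =>
    rw [← n.bit_testBit_zero_shiftRight_one, Nat.land_bit, Nat.ldiff_bit,
      Nat.bit_val, Nat.bit_val, Nat.bit_val]
    have := ih (n >>> 1)
    cases b <;> cases n.testBit 0 <;> simp [Bool.toNat] <;> omega

theorem pv_sub_and (m n : Nat) : m - (m &&& n) = Nat.ldiff m n := by
  have h := pv_and_add_ldiff m n
  omega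

theorem pv_nat_and_xor_or (m n : Nat) : (m &&& n) ^^^ (m ||| n) = m ^^^ n := by
  apply Nat.eq_of_testBit_eq
  intro i
  simp only [Nat.testBit_xor, Nat.testBit_and, Nat.testBit_or]
  cases m.testBit i <;> cases n.testBit i <;> rfl

theorem pv_nat_or_xor_and (m n : Nat) : (m ||| n) ^^^ (m &&& n) = m ^^^ n := by
  apply Nat.eq_of_testBit_eq
  intro i
  simp only [Nat.testBit_xor, Nat.testBit_and, Nat.testBit_or]
  cases m.testBit i <;> cases n.testBit i <;> rfl

theorem pv_nat_ldiff_xor (m n : Nat) : Nat.ldiff m n ^^^ Nat.ldiff n m = m ^^^ n := by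
  apply Nat.eq_of_testBit_eq
  intro i
  simp only [Nat.testBit_xor, Nat.testBit_ldiff]
  cases m.testBit i <;> cases n.testBit i <;> rfl

-- Python identity: (a & b) ^ (a | b) = a ^ b, on arbitrary ints
theorem pv_band_bxor_bor (a b : Int) :
    PySem.Int.bxor (PySem.Int.band a b) (PySem.Int.bor a b) = PySem.Int.bxor a b := by
  unfold PySem.Int.band PySem.Int.bor PySem.Int.bxor
  by_cases ha : 0 ≤ a <;> by_cases hb : 0 ≤ b <;>
    simp only [ha, hb, if_true, if_false] <;>
    split_ifs <;>
    simp_all [pv_sub_and] <;>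
    try omega
  · exact_mod_cast pv_nat_and_xor_or a.toNat b.toNat
  · exact pv_nat_ldiff_xor _ _
  · exact (pv_nat_ldiff_xor _ _).trans (Nat.xor_comm _ _)
  · exact pv_nat_or_xor_and _ _

-- A's eq-expression collapses to xor of the two minima
theorem pv_eq_expr (p : Int × Int) :
    PySem.Int.band (PySem.Int.bxor (PySem.Int.band p.2 p.1) (PySem.Int.bor p.2 p.1))
      (PySem.Int.bxor p.2 p.1) = PySem.Int.bxor p.1 p.2 := by
  rw [pv_band_bxor_bor, PySem.Int.band_self, PySem.Int.bxor_comm]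

theorem pvAStepVal_le (p : Int × Int) (h : p.1 ≤ p.2) (x : Int) :
    (pvAStepVal p x).1 ≤ (pvAStepVal p x).2 := by
  obtain ⟨p1, p2⟩ := p
  unfold pvAStepVal; split_ifs <;> (simp_all; try omega)

theorem pvAStepVal_eq_pvBStep (p : Int × Int) (h : p.1 ≤ p.2) (x : Int) :
    pvAStepVal p x = pvBStep p x := by
  unfold pvAStepVal pvBStep
  split_ifs <;> first | rfl | omega

theorem pv_foldA_eq_foldB (l : List Int) (p : Int × Int) (h : p.1 ≤ p.2) :
    l.foldl pvAStepVal p = l.foldl pvBStep p := by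
  induction l generalizing p with
  | nil => rfl
  | cons x t ih =>
    simp only [List.foldl_cons]
    rw [← pvAStepVal_eq_pvBStep p h x]
    exact ih _ (pvAStepVal_le p h x)

theorem pv_inner_fold (a0 a1 : Int) (rest : List Int) (p0 : Int × Int) (k : Nat)
    (hk : k ≤ rest.length) :
    (PySem.List.pyRange 2 ((k : Int) + 2) 1).foldl
      (fun p i => pvAStepVal p (PySem.List.pyGetD (a0 :: a1 :: rest) i 0)) p0 =
    (rest.take k).foldl pvAStepVal p0 := by
  induction k with
  | zero =>
    rw [PySem.List.pyRange_one_eq_nil (by norm_num)]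
    rfl
  | succ k ih =>
    have h1 : ((k + 1 : Nat) : Int) + 2 = ((k : Int) + 2) + 1 := by push_cast; ring
    rw [h1, PySem.List.pyRange_one_succ_right (by omega), List.foldl_append]
    rw [ih (by omega)]
    have hkl : k < rest.length := by omega
    have h2 : PySem.List.pyGetD (a0 :: a1 :: rest) ((k : Int) + 2) 0 = rest[k] := by
      have h3 : ((k : Int) + 2) = ((k + 2 : Nat) : Int) := by push_cast; ring
      rw [h3, PySem.List.pyGetD_natCast]
      simp [List.getD, hkl]
    have h4 : rest.take (k + 1) = rest.take k ++ [rest[k]] := by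
      rw [List.take_add_one]
      simp [List.getElem?_eq_getElem hkl]
    rw [h4, List.foldl_append]
    simp [h2]

-- findminandmax on the prefix of length k+2 = folding A's step over the first k tail elements
theorem pv_fmm_take (a0 a1 : Int) (rest : List Int) (k : Nat) (hk : k ≤ rest.length) :
    pvFindMinAndMax (a0 :: a1 :: rest) ((k : Int) + 1) =
      pvMkB ((rest.take k).foldl pvAStepVal (min a0 a1, max a0 a1)) := by
  unfold pvFindMinAndMax pvMkB
  have hg0 : PySem.List.pyGetD (a0 :: a1 :: rest) 0 0 = a0 := by
    simp [PySem.List.pyGetD]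
  have hg1 : PySem.List.pyGetD (a0 :: a1 :: rest) 1 0 = a1 := by
    simp [PySem.List.pyGetD]
  have h1 : (k : Int) + 1 + 1 = (k : Int) + 2 := by ring
  simp only [hg0, hg1, h1, pv_inner_fold a0 a1 rest _ k hk]
  rw [pv_eq_expr]

-- A's outer loop keeps a singleton stack: it is a running lexicographic maximum
theorem pv_outer_single (a : List Int) (is : List Int) (v : List Int) :
    is.foldl (pvOuterStep a) [v] =
      [is.foldl (fun v i =>
        if pvLexGt (pvFindMinAndMax a i) v then pvFindMinAndMax a i else v) v] := by
  induction is generalizing v with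
  | nil => rfl
  | cons i t ih =>
    simp only [List.foldl_cons]
    have h1 : pvOuterStep a [v] i =
        [if pvLexGt (pvFindMinAndMax a i) v then pvFindMinAndMax a i else v] := by
      unfold pvOuterStep
      simp only [List.length_cons, List.length_nil, List.getLast?_singleton,
        Option.getD_some, List.dropLast_singleton, List.nil_append]
      rw [if_neg (by omega)]
      split <;> rfl
    rw [h1, ih]

-- the central induction: B's single pass computes A's running maximum over all prefixes
theorem pv_main (a0 a1 : Int) (rest : List Int) (k : Nat) (hk : k ≤ rest.length) :
    (rest.take k).foldl
      (fun (s : (Int × Int) × List Int) x =>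
        let p := pvBStep s.1 x
        let cand := [PySem.Int.bxor p.1 p.2, p.1, p.2]
        (p, if pvLexGt cand s.2 then cand else s.2))
      ((min a0 a1, max a0 a1), pvMkB (min a0 a1, max a0 a1)) =
    ((rest.take k).foldl pvBStep (min a0 a1, max a0 a1),
     (PySem.List.pyRange 2 ((k : Int) + 2) 1).foldl
       (fun v i =>
         if pvLexGt (pvFindMinAndMax (a0 :: a1 :: rest) i) v
         then pvFindMinAndMax (a0 :: a1 :: rest) i else v)
       (pvMkB (min a0 a1, max a0 a1))) := by
  induction k with
  | zero =>
    rw [PySem.List.pyRange_one_eq_nil (by norm_num)]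
    rfl
  | succ k ih =>
    have hkl : k < rest.length := by omega
    have h4 : rest.take (k + 1) = rest.take k ++ [rest[k]] := by
      rw [List.take_add_one]
      simp [List.getElem?_eq_getElem hkl]
    have h1 : ((k + 1 : Nat) : Int) + 2 = ((k : Int) + 2) + 1 := by push_cast; ring
    have hfmm : pvFindMinAndMax (a0 :: a1 :: rest) ((k : Int) + 2) =
        pvMkB ((rest.take (k + 1)).foldl pvBStep (min a0 a1, max a0 a1)) := by
      have h5 : (k : Int) + 2 = ((k + 1 : Nat) : Int) + 1 := by push_cast; ring
      rw [h5, pv_fmm_take a0 a1 rest (k + 1) (by omega),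
        pv_foldA_eq_foldB _ _ (min_le_max)]
    rw [h4, List.foldl_append, List.foldl_append, ih (by omega), h1,
      PySem.List.pyRange_one_succ_right (by omega), List.foldl_append]
    simp only [List.foldl_cons, List.foldl_nil, hfmm, h4, List.foldl_append]
    rfl

-- ===== VERDICT (by name: the statement is the Claim_ definition above) =====
theorem pv_A_eval (a0 a1 : Int) (rest : List Int) :
    andXorOr (a0 :: a1 :: rest) =
      (PySem.List.pyRange 2 ((rest.length : Int) + 2) 1).foldl
        (fun v i => if pvLexGt (pvFindMinAndMax (a0 :: a1 :: rest) i) v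
          then pvFindMinAndMax (a0 :: a1 :: rest) i else v)
        (pvMkB (min a0 a1, max a0 a1)) := by
  unfold andXorOr
  have hn : (((a0 :: a1 :: rest).length : Nat) : Int) = (rest.length : Int) + 2 := by
    simp; ring
  rw [hn, PySem.List.pyRange_one_cons (by omega)]
  simp only [List.foldl_cons]
  have hstep : pvOuterStep (a0 :: a1 :: rest) [] 1 =
      [pvFindMinAndMax (a0 :: a1 :: rest) 1] := by
    unfold pvOuterStep; simp
  have h11 : (1 : Int) + 1 = 2 := by norm_num
  rw [hstep, h11, pv_outer_single]
  have hv : pvFindMinAndMax (a0 :: a1 :: rest) 1 = pvMkB (min a0 a1, max a0 a1) := by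
    have h := pv_fmm_take a0 a1 rest 0 (by omega)
    simpa using h
  rw [hv]
  simp [PySem.List.pyGetD]

theorem pv_B_eval (a0 a1 : Int) (rest : List Int) :
    andXorOr_alt (a0 :: a1 :: rest) =
      (PySem.List.pyRange 2 ((rest.length : Int) + 2) 1).foldl
        (fun v i => if pvLexGt (pvFindMinAndMax (a0 :: a1 :: rest) i) v
          then pvFindMinAndMax (a0 :: a1 :: rest) i else v)
        (pvMkB (min a0 a1, max a0 a1)) := by
  have hmain := pv_main a0 a1 rest rest.length (le_refl _)
  rw [List.take_length] at hmain
  show (rest.foldl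
      (fun (s : (Int × Int) × List Int) x =>
        let p := pvBStep s.1 x
        let cand := [PySem.Int.bxor p.1 p.2, p.1, p.2]
        (p, if pvLexGt cand s.2 then cand else s.2))
      ((min a0 a1, max a0 a1), pvMkB (min a0 a1, max a0 a1))).2 = _
  rw [hmain]

theorem andXorOr_spec : Claim_equal_andXorOr := by
  unfold Claim_equal_andXorOr
  intro a _ hpre
  unfold Pre_andXorOr at hpre
  unfold Spec_andXorOr
  cases a with
  | nil => simp at hpre
  | cons a0 t =>
    cases t with
    | nil => simp at hpre
    | cons a1 rest => rw [pv_A_eval, pv_B_eval]
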